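-- pv_equiv track=rewrite | github.com/Abhilash123-hub/SIR | app.py | get_plot_suggestions
-- ===== SOURCE A (Python) =====
-- def get_plot_suggestions(columns, column_types):
--     temporal_cols = [col for col, ctype in column_types.items() if ctype == 'temporal']
--     numerical_cols = [col for col, ctype in column_types.items() if ctype == 'numerical']
--     categorical_cols = [col for col, ctype in column_types.items() if ctype == 'categorical']
--     if temporal_cols and numerical_cols:
--         return {'plot_type': 'line', 'x_col': temporal_cols[0], 'y_col': numerical_cols[0]}
--     if categorical_cols and numerical_cols:
--         return {'plot_type': 'bar', 'x_col': categorical_cols[0], 'y_col': numerical_cols[0]}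
--     if len(numerical_cols) >= 2:
--         return {'plot_type': 'scatter', 'x_col': numerical_cols[0], 'y_col': numerical_cols[1]}
--     if len(categorical_cols) >= 2:
--         return {'plot_type': 'bar', 'x_col': categorical_cols[0], 'y_col': categorical_cols[1]}
--     return {'plot_type': 'bar', 'x_col': columns[0] if columns else '', 'y_col': columns[1] if len(columns) > 1 else ''}
-- ===== SOURCE B (Python) =====
-- def get_plot_suggestions(columns, column_types):
--     # one pass tracking only the first (and, where needed, second) column of each type
--     t1 = n1 = n2 = c1 = c2 = None
--     for col, ctype in column_types.items():
--         if ctype == 'temporal':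
--             if t1 is None:
--                 t1 = col
--         elif ctype == 'numerical':
--             if n1 is None:
--                 n1 = col
--             elif n2 is None:
--                 n2 = col
--         elif ctype == 'categorical':
--             if c1 is None:
--                 c1 = col
--             elif c2 is None:
--                 c2 = col
--     if t1 is not None and n1 is not None:
--         return {'plot_type': 'line', 'x_col': t1, 'y_col': n1}
--     if c1 is not None and n1 is not None:
--         return {'plot_type': 'bar', 'x_col': c1, 'y_col': n1}
--     if n2 is not None:
--         return {'plot_type': 'scatter', 'x_col': n1, 'y_col': n2}
--     if c2 is not None:
--         return {'plot_type': 'bar', 'x_col': c1, 'y_col': c2}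
--     return {'plot_type': 'bar', 'x_col': columns[0] if columns else '', 'y_col': columns[1] if len(columns) > 1 else ''}
-- ===== Notes on version B (the rewrite author's own statement) =====
-- stated objective: alternative
-- what changed: B replaces A's three separate filtering comprehensions (which build full per-type lists) by a single pass over column_types that tracks only the first temporal, first/second numerical and first/second categorical columns, then runs the same branch cascade on those tracked values.
import Mathlib
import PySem

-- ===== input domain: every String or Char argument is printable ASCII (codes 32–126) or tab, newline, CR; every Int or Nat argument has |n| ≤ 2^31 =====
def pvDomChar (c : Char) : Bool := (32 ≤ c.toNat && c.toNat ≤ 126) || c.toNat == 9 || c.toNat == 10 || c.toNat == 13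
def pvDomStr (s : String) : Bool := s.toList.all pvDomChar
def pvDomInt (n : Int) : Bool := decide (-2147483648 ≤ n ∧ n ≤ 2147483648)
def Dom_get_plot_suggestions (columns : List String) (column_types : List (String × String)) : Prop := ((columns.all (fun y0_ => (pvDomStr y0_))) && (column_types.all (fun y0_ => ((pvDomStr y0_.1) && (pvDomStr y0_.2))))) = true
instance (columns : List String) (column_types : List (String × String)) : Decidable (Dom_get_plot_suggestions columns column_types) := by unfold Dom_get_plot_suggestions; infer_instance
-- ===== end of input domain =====

-- B replaces A's three filtering comprehensions by a single pass that keeps only the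
-- first (and, where needed, second) column of each type (objective: alternative, same cost).

-- ===== PORT A =====
def get_plot_suggestions (columns : List String) (column_types : List (String × String)) : List (String × String) :=
  let temporal_cols := (column_types.filter (fun p => p.2 == "temporal")).map (fun p => p.1)
  let numerical_cols := (column_types.filter (fun p => p.2 == "numerical")).map (fun p => p.1)
  let categorical_cols := (column_types.filter (fun p => p.2 == "categorical")).map (fun p => p.1)
  if !temporal_cols.isEmpty && !numerical_cols.isEmpty then
    [("plot_type", "line"), ("x_col", temporal_cols.headD ""), ("y_col", numerical_cols.headD "")]
  else if !categorical_cols.isEmpty && !numerical_cols.isEmpty then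
    [("plot_type", "bar"), ("x_col", categorical_cols.headD ""), ("y_col", numerical_cols.headD "")]
  else if numerical_cols.length ≥ 2 then
    [("plot_type", "scatter"), ("x_col", numerical_cols.headD ""), ("y_col", numerical_cols.getD 1 "")]
  else if categorical_cols.length ≥ 2 then
    [("plot_type", "bar"), ("x_col", categorical_cols.headD ""), ("y_col", categorical_cols.getD 1 "")]
  else
    [("plot_type", "bar"), ("x_col", columns.headD ""), ("y_col", if columns.length > 1 then columns.getD 1 "" else "")]

-- ===== PORT B =====
-- loop body of B's single pass: state (t1, n1, n2, c1, c2)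
def pvBStep (s : Option String × Option String × Option String × Option String × Option String)
    (p : String × String) : Option String × Option String × Option String × Option String × Option String :=
  let (t1, n1, n2, c1, c2) := s
  if p.2 == "temporal" then
    (if t1.isNone then some p.1 else t1, n1, n2, c1, c2)
  else if p.2 == "numerical" then
    if n1.isNone then (t1, some p.1, n2, c1, c2)
    else if n2.isNone then (t1, n1, some p.1, c1, c2)
    else s
  else if p.2 == "categorical" then
    if c1.isNone then (t1, n1, n2, some p.1, c2)
    else if c2.isNone then (t1, n1, n2, c1, some p.1)
    else s
  else s

def get_plot_suggestions_alt (columns : List String) (column_types : List (String × String)) : List (String × String) :=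
  let (t1, n1, n2, c1, c2) := column_types.foldl pvBStep (none, none, none, none, none)
  if t1.isSome && n1.isSome then
    [("plot_type", "line"), ("x_col", t1.getD ""), ("y_col", n1.getD "")]
  else if c1.isSome && n1.isSome then
    [("plot_type", "bar"), ("x_col", c1.getD ""), ("y_col", n1.getD "")]
  else if n2.isSome then
    [("plot_type", "scatter"), ("x_col", n1.getD ""), ("y_col", n2.getD "")]
  else if c2.isSome then
    [("plot_type", "bar"), ("x_col", c1.getD ""), ("y_col", c2.getD "")]
  else
    [("plot_type", "bar"), ("x_col", columns.headD ""), ("y_col", if columns.length > 1 then columns.getD 1 "" else "")]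

-- ===== PRECONDITION & SPEC =====
def Spec_get_plot_suggestions (columns : List String) (column_types : List (String × String)) (out : List (String × String)) : Prop := out = get_plot_suggestions_alt columns column_types
instance (columns : List String) (column_types : List (String × String)) (out : List (String × String)) : Decidable (Spec_get_plot_suggestions columns column_types out) := by unfold Spec_get_plot_suggestions; infer_instance

-- ===== CLAIM (what is proved, stated in full; the proofs are below) =====
def Claim_equal_get_plot_suggestions : Prop := ∀ (columns : List String) (column_types : List (String × String)), Dom_get_plot_suggestions columns column_types → Spec_get_plot_suggestions columns column_types (get_plot_suggestions columns column_types)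

-- ===== LEMMAS AND PROOFS =====

-- first/second element tracked by B, given the already-tracked pair (a, b) and the
-- remaining filtered list xs; only used under the invariant a = none → b = none
def pvComb {α : Type} (a b : Option α) (xs : List α) : Option α × Option α :=
  match a with
  | none => (xs[0]?, xs[1]?)
  | some x =>
    match b with
    | none => (some x, xs[0]?)
    | some y => (some x, some y)

lemma pvFold_char (l : List (String × String)) (t1 n1 n2 c1 c2 : Option String)
    (hn : n1 = none → n2 = none) (hc : c1 = none → c2 = none) :
    l.foldl pvBStep (t1, n1, n2, c1, c2) =
      (t1.or ((l.filter (fun p => p.2 == "temporal")).map (fun p => p.1))[0]?,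
       (pvComb n1 n2 ((l.filter (fun p => p.2 == "numerical")).map (fun p => p.1))).1,
       (pvComb n1 n2 ((l.filter (fun p => p.2 == "numerical")).map (fun p => p.1))).2,
       (pvComb c1 c2 ((l.filter (fun p => p.2 == "categorical")).map (fun p => p.1))).1,
       (pvComb c1 c2 ((l.filter (fun p => p.2 == "categorical")).map (fun p => p.1))).2) := by
  induction l generalizing t1 n1 n2 c1 c2 with
  | nil =>
    cases t1 <;> cases n1 <;> cases n2 <;> cases c1 <;> cases c2 <;>
      simp_all [pvComb, Option.or]
  | cons a l ih =>
    simp only [List.foldl_cons, List.filter_cons]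
    by_cases ht : a.2 == "temporal"
    · have hn' : ¬ (a.2 == "numerical") := by simp_all
      have hc' : ¬ (a.2 == "categorical") := by simp_all
      simp only [pvBStep, ht, if_pos, hn', hc', Bool.false_eq_true, ite_false]
      rw [ih _ _ _ _ _ hn hc]
      cases t1 <;> simp [Option.or]
    · by_cases hnn : a.2 == "numerical"
      · have hc' : ¬ (a.2 == "categorical") := by simp_all
        simp only [pvBStep, ht, hnn, hc', Bool.false_eq_true, ite_false, ite_true]
        cases n1 with
        | none =>
          simp only [Option.isNone_none, ite_true]
          rw [ih t1 (some a.1) n2 c1 c2 (by simp) hc]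
          simp [pvComb, hn rfl]
        | some x =>
          cases n2 with
          | none =>
            simp only [Option.isNone_some, Bool.false_eq_true, ite_false, Option.isNone_none, ite_true]
            rw [ih t1 (some x) (some a.1) c1 c2 (by simp) hc]
            simp [pvComb]
          | some y =>
            simp only [Option.isNone_some, Bool.false_eq_true, ite_false]
            rw [ih t1 (some x) (some y) c1 c2 (by simp) hc]
            simp [pvComb]
      · by_cases hcc : a.2 == "categorical"
        · simp only [pvBStep, ht, hnn, hcc, Bool.false_eq_true, ite_false, ite_true]
          cases c1 with
          | none =>
            simp only [Option.isNone_none, ite_true]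
            rw [ih t1 n1 n2 (some a.1) c2 hn (by simp)]
            simp [pvComb, hc rfl]
          | some x =>
            cases c2 with
            | none =>
              simp only [Option.isNone_some, Bool.false_eq_true, ite_false, Option.isNone_none, ite_true]
              rw [ih t1 n1 n2 (some x) (some a.1) hn (by simp)]
              simp [pvComb]
            | some y =>
              simp only [Option.isNone_some, Bool.false_eq_true, ite_false]
              rw [ih t1 n1 n2 (some x) (some y) hn (by simp)]
              simp [pvComb]
        · simp only [pvBStep, ht, hnn, hcc, Bool.false_eq_true, ite_false]
          rw [ih _ _ _ _ _ hn hc]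

-- ===== VERDICT (by name: the statement is the Claim_ definition above) =====
theorem get_plot_suggestions_spec : Claim_equal_get_plot_suggestions := by
  intro columns column_types _
  unfold Spec_get_plot_suggestions
  simp only [get_plot_suggestions, get_plot_suggestions_alt]
  rw [pvFold_char column_types none none none none none (fun _ => rfl) (fun _ => rfl)]
  generalize (column_types.filter (fun p => p.2 == "temporal")).map (fun p => p.1) = T
  generalize (column_types.filter (fun p => p.2 == "numerical")).map (fun p => p.1) = N
  generalize (column_types.filter (fun p => p.2 == "categorical")).map (fun p => p.1) = C
  rcases T with _ | ⟨t, T⟩ <;>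
  rcases N with _ | ⟨n, _ | ⟨n', N⟩⟩ <;>
  rcases C with _ | ⟨c, _ | ⟨c', C⟩⟩ <;>
    simp [pvComb, List.headD, List.getD]
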